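-- pv_equiv track=rewrite | github.com/ActiveBrainAtlasPipeline/center_of_mass | utilities_cvat_neuroglancer.py | get_structure_number
-- ===== SOURCE A (Python) =====
-- def get_db_structure_infos():
--     db_structures = {'10N_L': ['Dorsal nucleus of vagus nerve', 1],
--      '10N_R': ['Dorsal nucleus of vagus nerve', 1],
--      '12N': ['Hypoglossal nucleus', 2],
--      '3N_L': ['Oculomotor nucleus', 3],
--      '3N_R': ['Oculomotor nucleus', 3],
--      '4N_L': ['Trochlear nucleus', 4],
--      '4N_R': ['Trochlear nucleus', 4],
--      '5N_L': ['Trigeminal motor nucleus', 5],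
--      '5N_R': ['Trigeminal motor nucleus', 5],
--      '6N_L': ['Abducens nucleus', 6],
--      '6N_R': ['Abducens nucleus', 6],
--      '7N_L': ['Facial nucleus', 7],
--      '7N_R': ['Facial nucleus', 7],
--      '7n_L': ['Facial nerve', 9],
--      '7n_R': ['Facial nerve', 9],
--      'AP': ['Area postrema', 28],
--      'Amb_L': ['Nucleus ambiggus', 8],
--      'Amb_R': ['Nucleus ambiggus', 8],
--      'DC_L': ['Dorsal cochlea nucleus', 10],
--      'DC_R': ['Dorsal cochlea nucleus', 10],
--      'IC': ['Inferior colliculus', 11],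
--      'LC_L': ['Locus corelus', 12],
--      'LC_R': ['Locus corelus', 12],
--      'LRt_L': ['Lateral reticular nucleus', 13],
--      'LRt_R': ['Lateral reticular nucleus', 13],
--      'PBG_L': ['Parabigeminal nucleus', 14],
--      'PBG_R': ['Parabigeminal nucleus', 14],
--      'Pn_L': ['Pontine grey', 15],
--      'Pn_R': ['Pontine grey', 15],
--      'R': ['Red nucleus', 16],
--      'RtTg': ['Reticulotegmental nucleus', 17],
--      'SC': ['Superior colliculus', 18],
--      'SNC_L': ['Substantia niagra, compact', 19],
--      'SNC_R': ['Substantia niagra, compact', 19],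
--      'SNR_L': ['Substantia niagra, reticular', 20],
--      'SNR_R': ['Substantia niagra, reticular', 20],
--      'Sp5C_L': ['Spinal-trigeminal nucleus, caudalis', 21],
--      'Sp5C_R': ['Spinal-trigeminal nucleus, caudalis', 21],
--      'Sp5I_L': ['Spinal-trigeminal nucleus, interpolaris', 22],
--      'Sp5I_R': ['Spinal-trigeminal nucleus, interpolaris', 22],
--      'Sp5O_L': ['Spinal-trigeminal nucleus, oralis', 23],
--      'Sp5O_R': ['Spinal-trigeminal nucleus, oralis', 23],
--      'Tz_L': ['Nucleus of trapezoidal body', 24],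
--      'Tz_R': ['Nucleus of trapezoidal body', 24],
--      'VCA_L': ['Ventral cochlea nucleus, anterior', 25],
--      'VCA_R': ['Ventral cochlea nucleus, anterior', 25],
--      'VCP_L': ['Ventral cochlea nucleus, posterior', 26],
--      'VCP_R': ['Ventral cochlea nucleus, posterior', 26],
--      'VLL_L': ['Ventral lateral lemniscus', 27],
--      'VLL_R': ['Ventral lateral lemniscus', 27]}
--     return db_structures
--
-- def get_known_foundation_structure_names():
--     known_foundation_structures = ['MVePC', 'DTgP', 'VTA', 'Li', 'Op', 'Sp5C', 'RPC', 'MVeMC', 'APT', 'IPR',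
--                                    'Cb', 'pc', 'Amb', 'SolIM', 'Pr5VL', 'IPC', '8n', 'MPB', 'Pr5', 'SNR',
--                                    'DRD', 'PBG', '10N', 'VTg', 'R', 'IF', 'RR', 'LDTg', '5TT', 'Bar',
--                                    'Tz', 'IO', 'Cu', 'SuVe', '12N', '6N', 'PTg', 'Sp5I', 'SNC', 'MnR',
--                                    'RtTg', 'Gr', 'ECu', 'DTgC', '4N', 'IPA', '3N', '7N', 'LC', '7n',
--                                    'SC', 'LPB', 'EW', 'Pr5DM', 'VCA', '5N', 'Dk', 'DTg', 'LVe', 'SpVe',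
--                                    'MVe', 'LSO', 'InC', 'IC', 'Sp5O', 'DC', 'Pn', 'LRt', 'RMC', 'PF',
--                                    'VCP', 'CnF', 'Sol', 'IPL', 'X', 'AP', 'MiTg', 'DRI', 'RPF', 'VLL']
--     return known_foundation_structures
--
-- def get_structure_number(structure):
--     db_structure_infos = get_db_structure_infos()
--     known_foundation_structure_names = get_known_foundation_structure_names()
--     non_db_structure_names = [structure for structure in known_foundation_structure_names if structure not in db_structure_infos.keys()]
--
--     if structure in db_structure_infos:
--         color = db_structure_infos[structure][1]
--     elif structure in non_db_structure_names:
--         color = len(db_structure_infos) + non_db_structure_names.index(structure) + 1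
--     else:
--         color = 255
--     return color
-- ===== SOURCE B (Python) =====
-- _DB_COLORS = {'10N_L': 1, '10N_R': 1, '12N': 2, '3N_L': 3, '3N_R': 3, '4N_L': 4,
--               '4N_R': 4, '5N_L': 5, '5N_R': 5, '6N_L': 6, '6N_R': 6, '7N_L': 7,
--               '7N_R': 7, '7n_L': 9, '7n_R': 9, 'AP': 28, 'Amb_L': 8, 'Amb_R': 8,
--               'DC_L': 10, 'DC_R': 10, 'IC': 11, 'LC_L': 12, 'LC_R': 12,
--               'LRt_L': 13, 'LRt_R': 13, 'PBG_L': 14, 'PBG_R': 14, 'Pn_L': 15,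
--               'Pn_R': 15, 'R': 16, 'RtTg': 17, 'SC': 18, 'SNC_L': 19, 'SNC_R': 19,
--               'SNR_L': 20, 'SNR_R': 20, 'Sp5C_L': 21, 'Sp5C_R': 21, 'Sp5I_L': 22,
--               'Sp5I_R': 22, 'Sp5O_L': 23, 'Sp5O_R': 23, 'Tz_L': 24, 'Tz_R': 24,
--               'VCA_L': 25, 'VCA_R': 25, 'VCP_L': 26, 'VCP_R': 26, 'VLL_L': 27,
--               'VLL_R': 27}
--
-- _FOUNDATION = ['MVePC', 'DTgP', 'VTA', 'Li', 'Op', 'Sp5C', 'RPC', 'MVeMC', 'APT', 'IPR',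
--                'Cb', 'pc', 'Amb', 'SolIM', 'Pr5VL', 'IPC', '8n', 'MPB', 'Pr5', 'SNR',
--                'DRD', 'PBG', '10N', 'VTg', 'R', 'IF', 'RR', 'LDTg', '5TT', 'Bar',
--                'Tz', 'IO', 'Cu', 'SuVe', '12N', '6N', 'PTg', 'Sp5I', 'SNC', 'MnR',
--                'RtTg', 'Gr', 'ECu', 'DTgC', '4N', 'IPA', '3N', '7N', 'LC', '7n',
--                'SC', 'LPB', 'EW', 'Pr5DM', 'VCA', '5N', 'Dk', 'DTg', 'LVe', 'SpVe',
--                'MVe', 'LSO', 'InC', 'IC', 'Sp5O', 'DC', 'Pn', 'LRt', 'RMC', 'PF',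
--                'VCP', 'CnF', 'Sol', 'IPL', 'X', 'AP', 'MiTg', 'DRI', 'RPF', 'VLL']
--
-- # One combined lookup table: db colors first, then each non-db foundation name
-- # gets 50 + (1-based position among non-db names); first occurrence wins.
-- _TABLE = dict(_DB_COLORS)
-- _n = 0
-- for _name in _FOUNDATION:
--     if _name not in _DB_COLORS:
--         _n += 1
--         if _name not in _TABLE:
--             _TABLE[_name] = 50 + _n
--
-- def get_structure_number(structure):
--     return _TABLE.get(structure, 255)
-- ===== Notes on version B (the rewrite author's own statement) =====
-- stated objective: simpler
-- what changed: Replaces A's three-branch runtime test (dict membership, filtered-list membership plus a linear .index scan) with one lookup table precomputed once in a single pass over the foundation list, so the function body is a single table.get(structure, 255).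
import Mathlib
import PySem

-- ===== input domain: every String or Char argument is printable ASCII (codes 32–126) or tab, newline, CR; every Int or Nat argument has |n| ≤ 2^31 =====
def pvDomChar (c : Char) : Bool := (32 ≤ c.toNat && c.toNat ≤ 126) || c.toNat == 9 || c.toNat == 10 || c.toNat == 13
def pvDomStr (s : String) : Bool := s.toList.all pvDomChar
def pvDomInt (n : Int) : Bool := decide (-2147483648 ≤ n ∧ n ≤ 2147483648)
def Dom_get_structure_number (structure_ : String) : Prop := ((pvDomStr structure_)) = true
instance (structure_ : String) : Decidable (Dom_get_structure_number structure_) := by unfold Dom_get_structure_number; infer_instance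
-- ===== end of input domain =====

-- B precomputes a single name→color table; the function body is one lookup (objective: simpler).

-- ===== PORT A =====
-- db_structures: values ['description', number] ported as String × Int pairs
def pvDbA : PySem.Dict String (String × Int) := PySem.Dict.ofList
  [("10N_L", ("Dorsal nucleus of vagus nerve", 1)), ("10N_R", ("Dorsal nucleus of vagus nerve", 1)),
   ("12N", ("Hypoglossal nucleus", 2)), ("3N_L", ("Oculomotor nucleus", 3)), ("3N_R", ("Oculomotor nucleus", 3)),
   ("4N_L", ("Trochlear nucleus", 4)), ("4N_R", ("Trochlear nucleus", 4)),
   ("5N_L", ("Trigeminal motor nucleus", 5)), ("5N_R", ("Trigeminal motor nucleus", 5)),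
   ("6N_L", ("Abducens nucleus", 6)), ("6N_R", ("Abducens nucleus", 6)),
   ("7N_L", ("Facial nucleus", 7)), ("7N_R", ("Facial nucleus", 7)),
   ("7n_L", ("Facial nerve", 9)), ("7n_R", ("Facial nerve", 9)),
   ("AP", ("Area postrema", 28)), ("Amb_L", ("Nucleus ambiggus", 8)), ("Amb_R", ("Nucleus ambiggus", 8)),
   ("DC_L", ("Dorsal cochlea nucleus", 10)), ("DC_R", ("Dorsal cochlea nucleus", 10)),
   ("IC", ("Inferior colliculus", 11)), ("LC_L", ("Locus corelus", 12)), ("LC_R", ("Locus corelus", 12)),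
   ("LRt_L", ("Lateral reticular nucleus", 13)), ("LRt_R", ("Lateral reticular nucleus", 13)),
   ("PBG_L", ("Parabigeminal nucleus", 14)), ("PBG_R", ("Parabigeminal nucleus", 14)),
   ("Pn_L", ("Pontine grey", 15)), ("Pn_R", ("Pontine grey", 15)),
   ("R", ("Red nucleus", 16)), ("RtTg", ("Reticulotegmental nucleus", 17)), ("SC", ("Superior colliculus", 18)),
   ("SNC_L", ("Substantia niagra, compact", 19)), ("SNC_R", ("Substantia niagra, compact", 19)),
   ("SNR_L", ("Substantia niagra, reticular", 20)), ("SNR_R", ("Substantia niagra, reticular", 20)),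
   ("Sp5C_L", ("Spinal-trigeminal nucleus, caudalis", 21)), ("Sp5C_R", ("Spinal-trigeminal nucleus, caudalis", 21)),
   ("Sp5I_L", ("Spinal-trigeminal nucleus, interpolaris", 22)), ("Sp5I_R", ("Spinal-trigeminal nucleus, interpolaris", 22)),
   ("Sp5O_L", ("Spinal-trigeminal nucleus, oralis", 23)), ("Sp5O_R", ("Spinal-trigeminal nucleus, oralis", 23)),
   ("Tz_L", ("Nucleus of trapezoidal body", 24)), ("Tz_R", ("Nucleus of trapezoidal body", 24)),
   ("VCA_L", ("Ventral cochlea nucleus, anterior", 25)), ("VCA_R", ("Ventral cochlea nucleus, anterior", 25)),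
   ("VCP_L", ("Ventral cochlea nucleus, posterior", 26)), ("VCP_R", ("Ventral cochlea nucleus, posterior", 26)),
   ("VLL_L", ("Ventral lateral lemniscus", 27)), ("VLL_R", ("Ventral lateral lemniscus", 27))]

def pvKnownA : List String :=
  ["MVePC", "DTgP", "VTA", "Li", "Op", "Sp5C", "RPC", "MVeMC", "APT", "IPR",
   "Cb", "pc", "Amb", "SolIM", "Pr5VL", "IPC", "8n", "MPB", "Pr5", "SNR",
   "DRD", "PBG", "10N", "VTg", "R", "IF", "RR", "LDTg", "5TT", "Bar",
   "Tz", "IO", "Cu", "SuVe", "12N", "6N", "PTg", "Sp5I", "SNC", "MnR",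
   "RtTg", "Gr", "ECu", "DTgC", "4N", "IPA", "3N", "7N", "LC", "7n",
   "SC", "LPB", "EW", "Pr5DM", "VCA", "5N", "Dk", "DTg", "LVe", "SpVe",
   "MVe", "LSO", "InC", "IC", "Sp5O", "DC", "Pn", "LRt", "RMC", "PF",
   "VCP", "CnF", "Sol", "IPL", "X", "AP", "MiTg", "DRI", "RPF", "VLL"]

def get_structure_number (structure_ : String) : Int :=
  let db_structure_infos := pvDbA
  let known_foundation_structure_names := pvKnownA
  let non_db_structure_names :=
    known_foundation_structure_names.filter (fun s => !(db_structure_infos.keys.contains s))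
  if db_structure_infos.contains structure_ then
    (db_structure_infos.getD structure_ ("", 0)).2      -- db[structure][1]; guarded by the contains test
  else if non_db_structure_names.contains structure_ then
    (db_structure_infos.size : Int) + (((PySem.List.index? non_db_structure_names structure_).getD 0 : Nat) : Int) + 1
  else
    255

-- ===== PORT B =====
def pvDbColorsB : PySem.Dict String Int := PySem.Dict.ofList
  [("10N_L", 1), ("10N_R", 1), ("12N", 2), ("3N_L", 3), ("3N_R", 3), ("4N_L", 4),
   ("4N_R", 4), ("5N_L", 5), ("5N_R", 5), ("6N_L", 6), ("6N_R", 6), ("7N_L", 7),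
   ("7N_R", 7), ("7n_L", 9), ("7n_R", 9), ("AP", 28), ("Amb_L", 8), ("Amb_R", 8),
   ("DC_L", 10), ("DC_R", 10), ("IC", 11), ("LC_L", 12), ("LC_R", 12),
   ("LRt_L", 13), ("LRt_R", 13), ("PBG_L", 14), ("PBG_R", 14), ("Pn_L", 15),
   ("Pn_R", 15), ("R", 16), ("RtTg", 17), ("SC", 18), ("SNC_L", 19), ("SNC_R", 19),
   ("SNR_L", 20), ("SNR_R", 20), ("Sp5C_L", 21), ("Sp5C_R", 21), ("Sp5I_L", 22),
   ("Sp5I_R", 22), ("Sp5O_L", 23), ("Sp5O_R", 23), ("Tz_L", 24), ("Tz_R", 24),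
   ("VCA_L", 25), ("VCA_R", 25), ("VCP_L", 26), ("VCP_R", 26), ("VLL_L", 27),
   ("VLL_R", 27)]

def pvFoundationB : List String := pvKnownA

-- the module-level loop of Source B: (table, counter) folded once over the foundation list
def pvTableB : PySem.Dict String Int :=
  (pvFoundationB.foldl
    (fun (st : PySem.Dict String Int × Int) name =>
      if pvDbColorsB.contains name then st
      else
        let n := st.2 + 1
        (if st.1.contains name then st.1 else st.1.insert name (50 + n), n))
    (pvDbColorsB, 0)).1

def get_structure_number_alt (structure_ : String) : Int :=
  pvTableB.getD structure_ 255

-- ===== PRECONDITION & SPEC =====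
def Spec_get_structure_number (structure_ : String) (out : Int) : Prop := out = get_structure_number_alt structure_
instance (structure_ : String) (out : Int) : Decidable (Spec_get_structure_number structure_ out) := by unfold Spec_get_structure_number; infer_instance

-- ===== CLAIM (what is proved, stated in full; the proofs are below) =====
def Claim_equal_get_structure_number : Prop := ∀ (structure_ : String), Dom_get_structure_number structure_ → Spec_get_structure_number structure_ (get_structure_number structure_)

-- ===== LEMMAS AND PROOFS =====

-- every name either port can react to
def pvAllNames : List String := pvDbA.keys ++ pvKnownA

set_option maxRecDepth 40000 in
theorem pv_eq_on_names : ∀ s ∈ pvAllNames,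
    get_structure_number s = get_structure_number_alt s := by decide

set_option maxRecDepth 40000 in
theorem pv_keys_tableB : pvTableB.keys ⊆ pvAllNames := by decide

theorem pv_eq_off_names (s : String) (hs : s ∉ pvAllNames) :
    get_structure_number s = get_structure_number_alt s := by
  have hdb : pvDbA.contains s = false := by
    rw [PySem.Dict.contains_eq_decide_mem_keys]
    simp only [decide_eq_false_iff_not]
    intro h
    exact hs (List.mem_append_left _ h)
  have hnon : (pvKnownA.filter (fun n => !(pvDbA.keys.contains n))).contains s = false := by
    simp only [List.contains_eq_mem, decide_eq_false_iff_not, List.mem_filter]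
    rintro ⟨h, -⟩
    exact hs (List.mem_append_right _ h)
  have htab : pvTableB.contains s = false := by
    rw [PySem.Dict.contains_eq_decide_mem_keys]
    simp only [decide_eq_false_iff_not]
    intro h
    exact hs (pv_keys_tableB h)
  unfold get_structure_number get_structure_number_alt
  simp only [hdb, hnon, if_false, Bool.false_eq_true]
  exact (PySem.Dict.getD_of_not_contains _ _ htab).symm

-- ===== VERDICT (by name: the statement is the Claim_ definition above) =====
theorem get_structure_number_spec : Claim_equal_get_structure_number := by
  intro s _
  unfold Spec_get_structure_number
  by_cases hs : s ∈ pvAllNames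
  · exact pv_eq_on_names s hs
  · exact pv_eq_off_names s hs
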